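-- pv_equiv track=rewrite | github.com/tuur/STPS | lib/tree_intersections.py | add_maximal_tuple
-- ===== SOURCE A (Python) =====
-- def add_maximal_tuple(tup, s):
-- 	"""adds a tuple to a set of maximal tuples, such that is is again a set of maximal tuples"""
-- 	for t in s.copy():
-- 		sim = tuple_intersection(tup, t)
-- 		if sim == tup: # tup is a subtuple of t
-- 			return s
-- 		if sim == t:
-- 			s.remove(t) # t is a subtuple of tup
-- 	s.add(tup)
-- 	return s
--
-- def tuple_intersection(t1,t2): #sim((1,2,3,4),(1,2,3))=(1,2,3), and sim((1,2,3),(1,1,1))=(1,)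
--     if len(t1)==0 or len(t2)==0:
--         return ()
--     if t1[0]==t2[0]:
--         if len(t1)>1 and len(t2)>1:
--             return t1[:1] + tuple_intersection(t1[1:],t2[1:])
--         else:
--             return (t1[0],)
--     else:
--         return ()
-- ===== SOURCE B (Python) =====
-- def add_maximal_tuple(tup, s):
--     """adds a tuple to a set of maximal tuples, such that it is again a set of maximal tuples"""
--     n = len(tup)
--     if any(t[:n] == tup for t in s):   # tup is a prefix (subtuple) of some kept tuple
--         return s
--     s -= {t for t in s if tup[:len(t)] == t}   # drop every tuple that is a prefix of tup
--     s.add(tup)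
--     return s
-- ===== Notes on version B (the rewrite author's own statement) =====
-- stated objective: idiomatic
-- what changed: A scans the set while mutating it, computing a recursive longest-common-prefix per element with early return; B does a single any() prefix-slice test and, if it fails, one set-comprehension difference plus add, with no recursion and no mutation during iteration.
-- outside the precondition, e.g. on add_maximal_tuple((1, 2), {(1,), (1, 2, 3)}): A returns {(1, 2, 3)}, B returns {(1,), (1, 2, 3)}
import Mathlib
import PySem

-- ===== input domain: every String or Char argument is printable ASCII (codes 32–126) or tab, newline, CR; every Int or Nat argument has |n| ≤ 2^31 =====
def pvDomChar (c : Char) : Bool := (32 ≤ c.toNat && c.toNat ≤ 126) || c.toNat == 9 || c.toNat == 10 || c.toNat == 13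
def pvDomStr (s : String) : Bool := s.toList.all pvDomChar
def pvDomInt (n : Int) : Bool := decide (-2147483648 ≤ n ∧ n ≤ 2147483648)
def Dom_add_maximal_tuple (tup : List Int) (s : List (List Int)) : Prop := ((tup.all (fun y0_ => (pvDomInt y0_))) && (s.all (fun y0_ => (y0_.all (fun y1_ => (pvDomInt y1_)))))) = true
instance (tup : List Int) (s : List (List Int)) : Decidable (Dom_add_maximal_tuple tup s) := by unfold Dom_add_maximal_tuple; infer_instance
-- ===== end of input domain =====

-- B replaces A's mutate-while-scanning loop with recursive longest-common-prefix by an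
-- any() prefix test plus one set-comprehension (idiomatic, same cost); both A and B mutate
-- the set argument s in place — the equivalence proved here is about the RETURN value.

-- ===== PORT A =====

def tuple_intersection (t1 t2 : List Int) : List Int :=
  if t1.length = 0 ∨ t2.length = 0 then []
  else if t1.headI = t2.headI then      -- t1[0] == t2[0]; both nonempty here, headI is exact
    if 1 < t1.length ∧ 1 < t2.length then
      t1.take 1 ++ tuple_intersection (t1.drop 1) (t2.drop 1)
    else [t1.headI]
  else []
termination_by t1.length
decreasing_by simp; omega

-- the 'for t in s.copy():' loop of A: iter is the copy being iterated, cur the mutated set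
def amtLoop (tup : List Int) (iter cur : List (List Int)) : List (List Int) :=
  match iter with
  | [] => PySem.Set.add cur tup                     -- s.add(tup)
  | t :: rest =>
    let sim := tuple_intersection tup t
    if sim = tup then cur                           -- return s
    else if sim = t then
      -- s.remove(t): t comes from s.copy() and is removed at most once, so it is
      -- present in cur and List.erase is exact (no KeyError reachable)
      amtLoop tup rest (cur.erase t)
    else amtLoop tup rest cur

def add_maximal_tuple (tup : List Int) (s : List (List Int)) : List (List Int) :=
  amtLoop tup s s

-- ===== PORT B =====

def add_maximal_tuple_alt (tup : List Int) (s : List (List Int)) : List (List Int) :=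
  let n := tup.length
  if s.any (fun t => t.take n == tup) then s        -- any(t[:n] == tup for t in s)
  else
    -- s -= {t for t in s if tup[:len(t)] == t}; then s.add(tup)
    PySem.Set.add (PySem.Set.diff s (s.filter (fun t => tup.take t.length == t))) tup

-- ===== PRECONDITION & SPEC =====
-- Pre_ excludes duplicated members (s is a Python set, so its Lean list holds distinct
-- elements) and the one order-dependent corner: some member of s strictly extends tup while
-- another is a strict prefix of tup — there A may remove the prefix and then early-return
-- without adding tup, depending on CPython's hash iteration order, an accident of set order
-- on which A's and B's values are both defensible.
def Pre_add_maximal_tuple (tup : List Int) (s : List (List Int)) : Prop :=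
  s.Nodup ∧ ∀ t ∈ s, tup <+: t → ∀ t' ∈ s, t' <+: tup → t' = tup
instance (tup : List Int) (s : List (List Int)) : Decidable (Pre_add_maximal_tuple tup s) := by
  unfold Pre_add_maximal_tuple; infer_instance

-- a prefix-antichain input inside Dom and Pre
def pvWitness_add_maximal_tuple : List Int × List (List Int) := ([1, 2], [[3], [1, 2, 3]])

def Spec_add_maximal_tuple (tup : List Int) (s : List (List Int)) (out : List (List Int)) : Prop := out = add_maximal_tuple_alt tup s
instance (tup : List Int) (s : List (List Int)) (out : List (List Int)) : Decidable (Spec_add_maximal_tuple tup s out) := by unfold Spec_add_maximal_tuple; infer_instance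

-- ===== CLAIM (what is proved, stated in full; the proofs are below) =====
def Claim_equal_add_maximal_tuple : Prop := ∀ (tup : List Int) (s : List (List Int)), Dom_add_maximal_tuple tup s → Pre_add_maximal_tuple tup s → Spec_add_maximal_tuple tup s (add_maximal_tuple tup s)

-- ===== LEMMAS AND PROOFS =====

-- longest common prefix, the clean specification of tuple_intersection
def lcp : List Int → List Int → List Int
  | a :: as, b :: bs => if a = b then a :: lcp as bs else []
  | _, _ => []

theorem ti_eq_lcp : ∀ t1 t2 : List Int, tuple_intersection t1 t2 = lcp t1 t2 := by
  intro t1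
  induction t1 with
  | nil => intro t2; simp [tuple_intersection, lcp]
  | cons a as ih =>
    intro t2
    cases t2 with
    | nil => simp [tuple_intersection, lcp]
    | cons b bs =>
      rw [tuple_intersection]
      simp only [List.length_cons, lcp]
      split_ifs with h0 h1 h2 h2' <;> simp_all <;>
        first
        | rw [ih]
        | (cases as <;> cases bs <;> simp_all [lcp])

theorem lcp_eq_left_iff : ∀ t1 t2 : List Int, lcp t1 t2 = t1 ↔ t1 <+: t2 := by
  intro t1
  induction t1 with
  | nil => intro t2; cases t2 <;> simp [lcp]
  | cons a as ih =>
    intro t2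
    cases t2 with
    | nil => simp [lcp]
    | cons b bs =>
      by_cases h : a = b
      · subst h; simp [lcp, List.cons_prefix_cons, ih]
      · simp only [lcp, if_neg h, List.cons_prefix_cons]
        constructor
        · intro heq; simp at heq
        · rintro ⟨heq, -⟩; exact absurd heq h

theorem lcp_comm : ∀ t1 t2 : List Int, lcp t1 t2 = lcp t2 t1 := by
  intro t1
  induction t1 with
  | nil => intro t2; cases t2 <;> simp [lcp]
  | cons a as ih =>
    intro t2
    cases t2 with
    | nil => simp [lcp]
    | cons b bs =>
      by_cases h : a = b
      · subst h; simp [lcp, ih]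
      · simp [lcp, h, Ne.symm h]

theorem ti_eq_fst_iff (t1 t2 : List Int) : tuple_intersection t1 t2 = t1 ↔ t1 <+: t2 := by
  rw [ti_eq_lcp, lcp_eq_left_iff]

theorem ti_eq_snd_iff (t1 t2 : List Int) : tuple_intersection t1 t2 = t2 ↔ t2 <+: t1 := by
  rw [ti_eq_lcp, lcp_comm, lcp_eq_left_iff]

-- case "no element of iter extends tup": the loop erases exactly the prefixes of tup
theorem amtLoop_no (tup : List Int) :
    ∀ (iter kept : List (List Int)), (kept ++ iter).Nodup → tup ∉ kept →
      (∀ t ∈ iter, ¬ tup <+: t) →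
      amtLoop tup iter (kept ++ iter) =
        (kept ++ iter.filter (fun t => !decide (t <+: tup))) ++ [tup] := by
  intro iter
  induction iter with
  | nil =>
    intro kept hnd htup _
    simp [amtLoop, PySem.Set.add_of_not_mem htup]
  | cons t rest ih =>
    intro kept hnd htup hiter
    have htnotpre : ¬ tup <+: t := hiter t (by simp)
    have htne : t ≠ tup := fun h => htnotpre (h ▸ List.prefix_refl t)
    have htkept : t ∉ kept := by
      have hdisj := (List.nodup_append.mp hnd).2.2
      intro hm; exact hdisj t hm t (by simp) rfl
    rw [amtLoop]
    simp only [ti_eq_fst_iff, ti_eq_snd_iff, htnotpre, if_false]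
    by_cases hrem : t <+: tup
    · rw [if_pos hrem]
      have herase : ((kept ++ t :: rest).erase t) = kept ++ rest := by
        rw [List.erase_append_right _ htkept, List.erase_cons_head]
      rw [herase]
      have hnd' : (kept ++ rest).Nodup := by
        refine List.Nodup.sublist ?_ hnd
        exact (List.sublist_cons_self t rest).append_left kept
      rw [ih kept hnd' htup (fun x hx => hiter x (by simp [hx]))]
      simp [hrem]
    · rw [if_neg hrem]
      have hre : kept ++ t :: rest = (kept ++ [t]) ++ rest := by simp
      rw [hre]
      have hnd' : ((kept ++ [t]) ++ rest).Nodup := by rw [← hre]; exact hnd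
      have htup' : tup ∉ kept ++ [t] := by
        intro hm
        rcases List.mem_append.mp hm with hm | hm
        · exact htup hm
        · exact htne (List.mem_singleton.mp hm).symm
      rw [ih (kept ++ [t]) hnd' htup' (fun x hx => hiter x (by simp [hx]))]
      simp [hrem]

-- case "some member extends tup, and no member is a strict prefix of tup": return cur
theorem amtLoop_yes (tup : List Int) :
    ∀ (iter cur : List (List Int)), (∃ t ∈ iter, tup <+: t) →
      (∀ t ∈ iter, t <+: tup → tup <+: t) →
      amtLoop tup iter cur = cur := by
  intro iter
  induction iter with
  | nil => rintro cur ⟨t, ht, -⟩; cases ht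
  | cons t rest ih =>
    intro cur hex hall
    rw [amtLoop]
    by_cases hp : tup <+: t
    · simp [ti_eq_fst_iff, hp]
    · have hnt : ¬ t <+: tup := fun hc => hp (hall t (by simp) hc)
      simp only [ti_eq_fst_iff, ti_eq_snd_iff, hp, hnt, if_false]
      refine ih cur ?_ (fun x hx => hall x (by simp [hx]))
      obtain ⟨x, hx, hpx⟩ := hex
      cases List.mem_cons.mp hx with
      | inl h => exact absurd (h ▸ hpx) hp
      | inr h => exact ⟨x, h, hpx⟩

theorem take_eq_iff_prefix (tup t : List Int) : (t.take tup.length == tup) = decide (tup <+: t) := by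
  by_cases h : tup <+: t
  · simp [h, (List.prefix_iff_eq_take.mp h).symm]
  · simp [h]
    intro heq
    exact h (List.prefix_iff_eq_take.mpr heq.symm)

-- ===== VERDICT (by name: the statement is the Claim_ definition above) =====
theorem add_maximal_tuple_spec : Claim_equal_add_maximal_tuple := by
  intro tup s _hdom hpre
  unfold Spec_add_maximal_tuple add_maximal_tuple add_maximal_tuple_alt
  by_cases h : ∃ t ∈ s, tup <+: t
  · -- some member extends tup: both return s
    have hany : s.any (fun t => t.take tup.length == tup) = true := by
      obtain ⟨t, ht, hp⟩ := h
      exact List.any_eq_true.mpr ⟨t, ht, by rw [take_eq_iff_prefix]; simpa⟩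
    simp only [hany, if_true]
    refine amtLoop_yes tup s s h ?_
    intro t ht hc
    obtain ⟨t0, ht0, hp0⟩ := h
    have : t = tup := hpre.2 t0 ht0 hp0 t ht hc
    exact this ▸ List.prefix_refl t
  · -- no member extends tup: both drop the prefixes of tup and append tup
    have hany : s.any (fun t => t.take tup.length == tup) = false := by
      rw [List.any_eq_false]
      intro t ht
      rw [take_eq_iff_prefix]
      simp only [decide_eq_true_eq]
      exact fun hc => h ⟨t, ht, hc⟩
    simp only [hany, Bool.false_eq_true, if_false]
    rw [not_exists] at h
    replace h : ∀ t ∈ s, ¬ tup <+: t := fun t ht hc => h t (by simp [ht, hc])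
    have hnd : s.Nodup := hpre.1
    have hA := amtLoop_no tup s [] (by simpa using hnd) (by simp) h
    rw [List.nil_append] at hA
    rw [hA, List.nil_append]
    -- B's set difference equals the same filter
    have hdiff : PySem.Set.diff s (s.filter (fun t => tup.take t.length == t)) =
        s.filter (fun t => !decide (t <+: tup)) := by
      unfold PySem.Set.diff
      apply List.filter_congr
      intro t ht
      have hmem : (t ∈ s.filter (fun t => tup.take t.length == t)) ↔ t <+: tup := by
        rw [List.mem_filter, take_eq_iff_prefix t tup]
        simp [ht]
      by_cases hc : t <+: tup
      · simp [hmem.mpr hc, hc]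
      · have : t ∉ s.filter (fun t => tup.take t.length == t) := fun hm => hc (hmem.mp hm)
        simp [this, hc]
    rw [hdiff]
    have htns : tup ∉ s.filter (fun t => !decide (t <+: tup)) := by
      intro hm
      have := (List.mem_filter.mp hm).2
      simp at this
    rw [PySem.Set.add_of_not_mem htns]
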